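-- pv_equiv track=rewrite | github.com/Dyun0/CodingTest | 프로그래머스/n^2배열자르기.py | solution
-- ===== SOURCE A (Python) =====
-- def solution(n, left, right):
--     answer = []
--
--     for i in range(left // n, right // n + 1):
--         for j in range(0, n):
--             if j < i:
--                 answer.append(i + 1)
--             else:
--                 answer.append(j + 1)
--     return answer[left % n:right - (left // n) * n + 1]
-- ===== SOURCE B (Python) =====
-- def solution(n, left, right):
--     # Each flat index k of the n x n array holds max(k//n, k%n) + 1;
--     # compute the slice directly, one value per requested index.
--     return [max(k // n, k % n) + 1 for k in range(left, right + 1)]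
-- ===== Notes on version B (the rewrite author's own statement) =====
-- stated objective: alternative
-- what changed: Instead of materialising all full rows from left//n to right//n and slicing the result, B computes the value max(k//n, k%n)+1 directly for each flat index k in [left, right]; this avoids the up-to-2n extra row elements A builds and discards, though both are linear in the slice length.
-- outside the precondition, e.g. on solution(-4, 0, 3): A returns [], B returns [1, 0, 0, 0]
import Mathlib
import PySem

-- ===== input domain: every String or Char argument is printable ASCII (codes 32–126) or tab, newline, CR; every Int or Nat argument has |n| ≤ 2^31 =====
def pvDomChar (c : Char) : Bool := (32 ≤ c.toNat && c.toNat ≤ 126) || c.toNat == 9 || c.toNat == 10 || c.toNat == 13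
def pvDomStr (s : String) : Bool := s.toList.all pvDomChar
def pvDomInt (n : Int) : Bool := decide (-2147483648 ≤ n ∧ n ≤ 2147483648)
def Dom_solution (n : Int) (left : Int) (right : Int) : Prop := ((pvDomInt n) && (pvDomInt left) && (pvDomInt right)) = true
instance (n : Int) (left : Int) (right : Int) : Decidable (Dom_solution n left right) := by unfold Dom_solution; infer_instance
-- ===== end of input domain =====

-- B computes each sliced value max(k//n, k%n)+1 directly instead of building whole rows and slicing them.

-- ===== PORT A =====
def solution (n : Int) (left : Int) (right : Int) : List Int :=
  let answer : List Int :=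
    (PySem.List.pyRange (PySem.Int.floordiv left n) (PySem.Int.floordiv right n + 1) 1).foldl
      (fun answer i =>
        (PySem.List.pyRange 0 n 1).foldl
          (fun answer j => if j < i then answer ++ [i + 1] else answer ++ [j + 1])
          answer)
      []
  PySem.List.slice answer (some (PySem.Int.mod left n))
    (some (right - (PySem.Int.floordiv left n) * n + 1))

-- ===== PORT B =====
def solution_alt (n : Int) (left : Int) (right : Int) : List Int :=
  (PySem.List.pyRange left (right + 1) 1).map
    (fun k => max (PySem.Int.floordiv k n) (PySem.Int.mod k n) + 1)

-- ===== PRECONDITION & SPEC =====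
-- Pre_ restricts to the natural domain n ≥ 1 (an array dimension): on n = 0 A raises
-- ZeroDivisionError, and on n < 0 A's empty result is an accident of the empty inner range,
-- unmatchable by any direct computation of the array values.
def Pre_solution (n : Int) (left : Int) (right : Int) : Prop := 1 ≤ n
instance (n : Int) (left : Int) (right : Int) : Decidable (Pre_solution n left right) := by
  unfold Pre_solution; infer_instance

def pvWitness_solution : Int × Int × Int := (3, 2, 5)

def Spec_solution (n : Int) (left : Int) (right : Int) (out : List Int) : Prop :=
  out = solution_alt n left right
instance (n : Int) (left : Int) (right : Int) (out : List Int) : Decidable (Spec_solution n left right out) := by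
  unfold Spec_solution; infer_instance

-- ===== CLAIM (what is proved, stated in full; the proofs are below) =====
def Claim_equal_solution : Prop := ∀ (n : Int) (left : Int) (right : Int),
  Dom_solution n left right → Pre_solution n left right →
  Spec_solution n left right (solution n left right)

-- ===== LEMMAS AND PROOFS =====

-- value of a flat index: f n m = max (m//n) (m%n) + 1
def pvF (n m : Int) : Int := max (PySem.Int.floordiv m n) (PySem.Int.mod m n) + 1

-- one row of A, rewritten as a map
theorem pv_row_eq (n i : Int) (acc : List Int) :
    (PySem.List.pyRange 0 n 1).foldl
      (fun answer j => if j < i then answer ++ [i + 1] else answer ++ [j + 1]) acc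
      = acc ++ (PySem.List.pyRange 0 n 1).map (fun j => max i j + 1) := by
  rw [PySem.List.foldl_congr_mem (g := fun acc j => acc ++ [max i j + 1])]
  · exact PySem.List.foldl_append_singleton_eq_map _ _ _
  · intro acc j _
    split_ifs with h
    · have : max i j = i := by omega
      rw [this]
    · have : max i j = j := by omega
      rw [this]

-- a row, expressed through the flat-index value function
theorem pv_row_as_flat (n i : Int) (hn : 0 < n) :
    (PySem.List.pyRange 0 n 1).map (fun j => max i j + 1)
      = (PySem.List.pyRange (i * n) (i * n + n) 1).map (pvF n) := by
  rw [PySem.List.pyRange_one, PySem.List.pyRange_one]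
  have hlen : (n - 0).toNat = (i * n + n - i * n).toNat := by omega
  rw [hlen, List.map_map, List.map_map]
  apply List.map_congr_left
  intro k hk
  have hk' : (k : Int) < n := by
    have := List.mem_range.mp hk
    omega
  have hk0 : (0:Int) ≤ (k:Int) := Int.natCast_nonneg k
  simp only [Function.comp_apply, pvF]
  have hdiv : PySem.Int.floordiv (i * n + (k:Int)) n = i := by
    rw [PySem.Int.floordiv_eq_iff_of_pos hn]
    constructor
    · omega
    · nlinarith
  have hmod : PySem.Int.mod (i * n + (k:Int)) n = (k:Int) := by
    have := PySem.Int.floordiv_mul_add_mod (i * n + (k:Int)) n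
    rw [hdiv] at this
    omega
  rw [hdiv, hmod]
  omega

-- the whole answer list of A is the map of pvF over the flat range of full rows
theorem pv_answer_eq (n : Int) (hn : 0 < n) (c : Nat) : ∀ (L : Int),
    (PySem.List.pyRange L (L + c) 1).flatMap
        (fun i => (PySem.List.pyRange 0 n 1).map (fun j => max i j + 1))
      = (PySem.List.pyRange (L * n) ((L + c) * n) 1).map (pvF n) := by
  induction c with
  | zero =>
      intro L
      simp [PySem.List.pyRange_one_eq_nil]
  | succ c ih =>
      intro L
      have h1 : (L : Int) ≤ L + c := by omega
      have hsplit : PySem.List.pyRange L (L + (c+1 : Nat)) 1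
          = PySem.List.pyRange L (L + c) 1 ++ [L + c] := by
        have := PySem.List.pyRange_one_succ_right h1
        have hcast : (L : Int) + ((c:Nat)+1 : Nat) = L + c + 1 := by push_cast; ring
        rw [hcast]
        exact this
      rw [hsplit, List.flatMap_append]
      rw [ih L]
      have hsplit2 : PySem.List.pyRange (L * n) ((L + (c+1:Nat)) * n) 1
          = PySem.List.pyRange (L * n) ((L + c) * n) 1
            ++ PySem.List.pyRange ((L + c) * n) ((L + c) * n + n) 1 := by
        have ha : L * n ≤ (L + c) * n := by nlinarith [Int.natCast_nonneg c]
        have hb : (L + c) * n ≤ (L + c) * n + n := by omega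
        have := PySem.List.pyRange_one_append (L * n) ((L + c) * n) ((L + c) * n + n) ha hb
        have hcast : ((L : Int) + ((c:Nat)+1 : Nat)) * n = (L + c) * n + n := by push_cast; ring
        rw [hcast]
        exact this
      rw [hsplit2, List.map_append]
      congr 1
      simp only [List.flatMap_cons, List.flatMap_nil, List.append_nil]
      exact pv_row_as_flat n (L + c) hn

-- slicing a mapped range yields the mapped sub-range
theorem pv_slice_map_range (f : Int → Int) (A B a b : Int)
    (h0a : 0 ≤ a) (hab : a ≤ b) (hAB : A + b ≤ B) :
    PySem.List.slice ((PySem.List.pyRange A B 1).map f) (some a) (some b)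
      = (PySem.List.pyRange (A + a) (A + b) 1).map f := by
  have h0b : 0 ≤ b := le_trans h0a hab
  rw [PySem.List.slice_toNat _ h0a h0b]
  have hsplit : PySem.List.pyRange A B 1
      = PySem.List.pyRange A (A + a) 1 ++
        (PySem.List.pyRange (A + a) (A + b) 1 ++ PySem.List.pyRange (A + b) B 1) := by
    rw [PySem.List.pyRange_one_append A (A + a) B (by omega) (by omega)]
    rw [PySem.List.pyRange_one_append (A + a) (A + b) B (by omega) (by omega)]
  rw [hsplit, List.map_append, List.map_append]
  have hlen1 : ((PySem.List.pyRange A (A + a) 1).map f).length = a.toNat := by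
    rw [List.length_map, PySem.List.length_pyRange_one]; omega
  rw [List.drop_append_of_le_length (by omega), List.drop_of_length_le (by omega)]
  simp only [List.nil_append]
  have hlen2 : ((PySem.List.pyRange (A + a) (A + b) 1).map f).length = b.toNat - a.toNat := by
    rw [List.length_map, PySem.List.length_pyRange_one]; omega
  rw [List.take_append_of_le_length (by omega), List.take_of_length_le (by omega)]

-- ===== VERDICT (by name: the statement is the Claim_ definition above) =====
-- slice of the empty list is empty
theorem pv_slice_nil (a b : Int) :
    PySem.List.slice ([] : List Int) (some a) (some b) = [] := by
  simp [PySem.List.slice]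

theorem solution_spec : Claim_equal_solution := by
  intro n left right _ hn
  unfold Spec_solution solution solution_alt Pre_solution at *
  set L := PySem.Int.floordiv left n with hL
  set R := PySem.Int.floordiv right n with hR
  have hn' : (0:Int) < n := by omega
  -- rewrite A's nested fold into a flatMap of rows
  rw [PySem.List.foldl_congr_mem _ _
        (fun acc i => acc ++ (PySem.List.pyRange 0 n 1).map (fun j => max i j + 1)) _
        (fun acc i _ => pv_row_eq n i acc),
      PySem.List.foldl_append_eq_flatMap, List.nil_append]
  -- bracket facts for L and R
  have hLb : L * n ≤ left ∧ left < (L + 1) * n :=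
    (PySem.Int.floordiv_eq_iff_of_pos hn').mp hL.symm
  have hRb : R * n ≤ right ∧ right < (R + 1) * n :=
    (PySem.Int.floordiv_eq_iff_of_pos hn').mp hR.symm
  have hmodl : PySem.Int.mod left n = left - L * n := by
    have := PySem.Int.floordiv_mul_add_mod left n
    rw [← hL] at this; omega
  by_cases hLR : L ≤ R
  case pos =>
    -- at least one row is produced
    have hc : R + 1 = L + ((R + 1 - L).toNat : Int) := by omega
    rw [hc, pv_answer_eq n hn' (R + 1 - L).toNat L, ← hc]
    by_cases hlr : left ≤ right
    case pos =>
      -- the generic case: slice the mapped flat range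
      have key := pv_slice_map_range (pvF n) (L * n) ((R + 1) * n)
          (PySem.Int.mod left n) (right - L * n + 1)
          (by rw [hmodl]; omega) (by rw [hmodl]; omega) (by nlinarith [hRb.2, hLR])
      rw [key]
      have h1 : L * n + PySem.Int.mod left n = left := by omega
      have h2 : L * n + (right - L * n + 1) = right + 1 := by ring
      rw [h1, h2]
      rfl
    case neg =>
      -- empty slice of a nonempty answer: stop index ≤ start index
      rw [PySem.List.slice_toNat _ (by rw [hmodl]; omega)
            (by nlinarith [hRb.1, hLR] : (0:Int) ≤ right - L * n + 1)]
      have hba : (right - L * n + 1).toNat ≤ (PySem.Int.mod left n).toNat := by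
        rw [hmodl]; omega
      rw [Nat.sub_eq_zero_of_le hba, List.take_zero]
      have : right + 1 ≤ left := by omega
      rw [PySem.List.pyRange_one_eq_nil this, List.map_nil]
  case neg =>
    -- no rows at all: both sides are empty
    have h1 : R + 1 ≤ L := by omega
    have h2 : right + 1 ≤ left := by nlinarith [hLb.1, hRb.2]
    rw [PySem.List.pyRange_one_eq_nil h1, PySem.List.pyRange_one_eq_nil h2]
    simp [pv_slice_nil]
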